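-- pv_equiv track=rewrite | github.com/Nitro-Carwash/AdventOfCode2023 | 14.py | tilt_platform_spin
-- ===== SOURCE A (Python) =====
-- def tilt_platform_spin(platform):
--     stopping_point_per_col = [0 for _ in range(len(platform[0]))]
--     # North
--     for y in range(len(platform)):
--         for x in range(len(platform[0])):
--             if platform[y][x] == 'O':
--                 platform[y][x] = '.'
--                 platform[stopping_point_per_col[x]][x] = 'O'
--                 stopping_point_per_col[x] += 1
--             if platform[y][x] == '#':
--                 stopping_point_per_col[x] = y + 1
--
--     # West
--     stopping_point_per_row = [0 for _ in range(len(platform))]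
--     for x in range(len(platform[0])):
--         for y in range(len(platform)):
--             if platform[y][x] == 'O':
--                 platform[y][x] = '.'
--                 platform[y][stopping_point_per_row[y]] = 'O'
--                 stopping_point_per_row[y] += 1
--             if platform[y][x] == '#':
--                 stopping_point_per_row[y] = x + 1
--
--     # South
--     stopping_point_per_col = [len(platform) - 1 for _ in range(len(platform[0]))]
--     for y in reversed(range(len(platform))):
--         for x in range(len(platform[0])):
--             if platform[y][x] == 'O':
--                 platform[y][x] = '.'
--                 platform[stopping_point_per_col[x]][x] = 'O'
--                 stopping_point_per_col[x] -= 1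
--             if platform[y][x] == '#':
--                 stopping_point_per_col[x] = y - 1
--
--     # East
--     stopping_point_per_row = [len(platform[0]) - 1 for _ in range(len(platform))]
--     for x in reversed(range(len(platform[0]))):
--         for y in range(len(platform)):
--             if platform[y][x] == 'O':
--                 platform[y][x] = '.'
--                 platform[y][stopping_point_per_row[y]] = 'O'
--                 stopping_point_per_row[y] -= 1
--             if platform[y][x] == '#':
--                 stopping_point_per_row[y] = x - 1
--
--     return platform
-- ===== SOURCE B (Python) =====
-- # Segment-repacking reimplementation: for each direction, pull out each line
-- # (column for N/S, row for W/E), split it at '#'s and repack each segment's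
-- # 'O's against the tilt wall, then write the line back in place (mutates the
-- # argument grid in place, like the original).
-- def _pack(seg):
--     k = seg.count('O')
--     return ['O'] * k + ['.' if c == 'O' else c for c in seg[k:]]
--
-- def _tilt_left(line):
--     out, seg = [], []
--     for c in line:
--         if c == '#':
--             out += _pack(seg)
--             out.append('#')
--             seg = []
--         else:
--             seg.append(c)
--     out += _pack(seg)
--     return out
--
-- def tilt_platform_spin(platform):
--     h, w = len(platform), len(platform[0])
--     # North: tilt each column toward index 0
--     for x in range(w):
--         col = _tilt_left([platform[y][x] for y in range(h)])
--         for y in range(h):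
--             platform[y][x] = col[y]
--     # West: tilt each row toward index 0
--     for y in range(h):
--         row = _tilt_left([platform[y][x] for x in range(w)])
--         for x in range(w):
--             platform[y][x] = row[x]
--     # South: tilt each column toward index h-1
--     for x in range(w):
--         col = _tilt_left([platform[y][x] for y in reversed(range(h))])[::-1]
--         for y in range(h):
--             platform[y][x] = col[y]
--     # East: tilt each row toward index w-1
--     for y in range(h):
--         row = _tilt_left([platform[y][x] for x in reversed(range(w))])[::-1]
--         for x in range(w):
--             platform[y][x] = row[x]
--     return platform
-- ===== Notes on version B (the rewrite author's own statement) =====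
-- stated objective: alternative
-- what changed: A simulates rolling with a moving stopping-point cursor per column/row updating the grid cell by cell; B extracts each column/row, splits it at '#' into segments and repacks each segment as counted 'O's against the tilt wall, then writes the whole line back.
import Mathlib
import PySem

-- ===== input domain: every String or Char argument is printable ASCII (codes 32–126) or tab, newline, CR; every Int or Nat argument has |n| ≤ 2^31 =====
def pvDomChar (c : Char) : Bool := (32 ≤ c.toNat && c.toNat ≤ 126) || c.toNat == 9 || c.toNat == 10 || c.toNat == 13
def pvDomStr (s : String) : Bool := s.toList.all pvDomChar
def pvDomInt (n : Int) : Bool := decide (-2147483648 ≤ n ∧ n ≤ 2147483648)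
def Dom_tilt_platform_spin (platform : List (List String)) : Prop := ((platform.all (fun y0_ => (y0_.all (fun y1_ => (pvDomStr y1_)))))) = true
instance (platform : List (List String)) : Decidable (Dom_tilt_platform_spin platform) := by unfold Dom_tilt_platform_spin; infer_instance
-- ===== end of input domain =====

-- B replaces A's in-place stopping-point cursor simulation by a per-line segment repacking
-- (both mutate the Python argument in place; the equivalence proved is about the returned grid).


-- ===== PORT A =====
-- shared 2-D indexing helpers: `getC g y x` = platform[y][x] (with a default that is
-- never reached on Pre_ inputs), `setC g y x v` = platform[y][x] = v.
def getC (g : List (List String)) (y x : Nat) : String := (g.getD y []).getD x ""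
def setC (g : List (List String)) (y x : Nat) (v : String) : List (List String) :=
  g.set y ((g.getD y []).set x v)

-- coordinates of position i of line ℓ: for o = true lines are columns (ℓ = x, i = y),
-- for o = false lines are rows (ℓ = y, i = x).
def coY (o : Bool) (ℓ i : Nat) : Nat := if o then i else ℓ
def coX (o : Bool) (ℓ i : Nat) : Nat := if o then ℓ else i

-- the loop body shared (textually identical in the Python, modulo direction plumbing) by
-- A's four passes: at time t on line ℓ, Python's
--   if platform[y][x] == 'O': platform[y][x] = '.'; platform[stop][...] = 'O'; stop ± 1
--   if platform[y][x] == '#': stop = t ± 1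
-- (`bump` is the stop update on 'O', `hm` the stop reset on '#'; Nat subtraction saturates,
--  which matches Python on every Pre_ input because the -1 values are never used as indices).
def astep (o : Bool) (bump hm : Nat → Nat) (t : Nat)
    (st : List (List String) × List Nat) (ℓ : Nat) : List (List String) × List Nat :=
  let s := st.2.getD ℓ 0
  let st := if getC st.1 (coY o ℓ t) (coX o ℓ t) = "O" then
      (setC (setC st.1 (coY o ℓ t) (coX o ℓ t) ".") (coY o ℓ s) (coX o ℓ s) "O",
       st.2.set ℓ (bump s))
    else st
  if getC st.1 (coY o ℓ t) (coX o ℓ t) = "#" then (st.1, st.2.set ℓ (hm t)) else st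

def tilt_platform_spin (platform : List (List String)) : List (List String) :=
  let h := platform.length
  let w := (platform.headD []).length
  -- North: for y in range(h): for x in range(w): …  (stop per column, init 0)
  let st := (List.range h).foldl
    (fun st y => (List.range w).foldl (astep true (· + 1) (· + 1) y) st)
    (platform, List.replicate w 0)
  -- West: for x in range(w): for y in range(h): …  (stop per row, init 0)
  let st := (List.range w).foldl
    (fun st x => (List.range h).foldl (astep false (· + 1) (· + 1) x) st)
    (st.1, List.replicate h 0)
  -- South: for y in reversed(range(h)): for x in range(w): …  (stop per column, init h-1)
  let st := ((List.range h).reverse).foldl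
    (fun st y => (List.range w).foldl (astep true (· - 1) (· - 1) y) st)
    (st.1, List.replicate w (h - 1))
  -- East: for x in reversed(range(w)): for y in range(h): …  (stop per row, init w-1)
  let st := ((List.range w).reverse).foldl
    (fun st x => (List.range h).foldl (astep false (· - 1) (· - 1) x) st)
    (st.1, List.replicate h (w - 1))
  st.1

-- ===== PORT B =====
def pvPack (seg : List String) : List String :=
  let k := seg.count "O"
  List.replicate k "O" ++ (seg.drop k).map (fun c => if c = "O" then "." else c)

def pvTiltLeft (line : List String) : List String :=
  let st := line.foldl
    (fun (st : List String × List String) c =>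
      if c = "#" then (st.1 ++ pvPack st.2 ++ ["#"], []) else (st.1, st.2 ++ [c]))
    ([], [])
  st.1 ++ pvPack st.2

def tilt_platform_spin_alt (platform : List (List String)) : List (List String) :=
  let h := platform.length
  let w := (platform.headD []).length
  -- North
  let g := (List.range w).foldl (fun g x =>
    let col := pvTiltLeft ((List.range h).map (fun y => getC g y x))
    (List.range h).foldl (fun g y => setC g y x (col.getD y "")) g) platform
  -- West
  let g := (List.range h).foldl (fun g y =>
    let row := pvTiltLeft ((List.range w).map (fun x => getC g y x))
    (List.range w).foldl (fun g x => setC g y x (row.getD x "")) g) g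
  -- South
  let g := (List.range w).foldl (fun g x =>
    let col := (pvTiltLeft (((List.range h).reverse).map (fun y => getC g y x))).reverse
    (List.range h).foldl (fun g y => setC g y x (col.getD y "")) g) g
  -- East
  let g := (List.range h).foldl (fun g y =>
    let row := (pvTiltLeft (((List.range w).reverse).map (fun x => getC g y x))).reverse
    (List.range w).foldl (fun g x => setC g y x (row.getD x "")) g) g
  g

-- ===== PRECONDITION & SPEC =====
-- Pre_ excludes exactly the inputs where the Python raises: the empty grid (platform[0]
-- is an IndexError) and grids with a row shorter than row 0 (IndexError in the loops).
def Pre_tilt_platform_spin (platform : List (List String)) : Prop :=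
  platform ≠ [] ∧ ∀ row ∈ platform, (platform.headD []).length ≤ row.length
instance (platform : List (List String)) : Decidable (Pre_tilt_platform_spin platform) := by
  unfold Pre_tilt_platform_spin; infer_instance

def pvWitness_tilt_platform_spin : List (List String) :=
  [["O", ".", "#"], ["#", "O", "O"], [".", "O", "."]]

def Spec_tilt_platform_spin (platform : List (List String)) (out : List (List String)) : Prop := out = tilt_platform_spin_alt platform
instance (platform : List (List String)) (out : List (List String)) : Decidable (Spec_tilt_platform_spin platform out) := by unfold Spec_tilt_platform_spin; infer_instance

-- ===== CLAIM (what is proved, stated in full; the proofs are below) =====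
def Claim_equal_tilt_platform_spin : Prop := ∀ (platform : List (List String)), Dom_tilt_platform_spin platform → Pre_tilt_platform_spin platform → Spec_tilt_platform_spin platform (tilt_platform_spin platform)

-- ===== LEMMAS AND PROOFS =====

-- ---------- basic list get/set lemmas ----------

theorem getD_oob {α : Type} (l : List α) (n : Nat) (d : α) (h : l.length ≤ n) :
    l.getD n d = d := by
  simp [List.getD_eq_getElem?_getD, List.getElem?_eq_none h]

theorem getD_set_self {α : Type} (l : List α) (n : Nat) (a d : α) :
    (l.set n a).getD n d = if n < l.length then a else d := by
  rcases Nat.lt_or_ge n l.length with h | h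
  · rw [List.getD_eq_getElem _ _ (by simpa using h)]
    simp [h]
  · rw [List.set_eq_of_length_le h, getD_oob _ _ _ h]
    simp [Nat.not_lt.2 h]

theorem getD_set_ne {α : Type} (l : List α) (n m : Nat) (a d : α) (h : m ≠ n) :
    (l.set n a).getD m d = l.getD m d := by
  simp [List.getD_eq_getElem?_getD, List.getElem?_set_ne (Ne.symm h)]

-- ---------- grid shape ----------

def rowLen (g : List (List String)) (y : Nat) : Nat := (g.getD y []).length

def GW (w : Nat) (g : List (List String)) : Prop := ∀ y, y < g.length → w ≤ rowLen g y

theorem length_setC (g : List (List String)) (y x : Nat) (v : String) :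
    (setC g y x v).length = g.length := by simp [setC]

theorem rowLen_setC (g : List (List String)) (y x : Nat) (v : String) (y' : Nat) :
    rowLen (setC g y x v) y' = rowLen g y' := by
  unfold rowLen setC
  by_cases h : y' = y
  · subst h
    rw [getD_set_self]
    split
    · simp
    · rw [getD_oob _ _ _ (by omega)]
  · rw [getD_set_ne _ _ _ _ _ h]

theorem GW_setC (w : Nat) (g : List (List String)) (y x : Nat) (v : String) (h : GW w g) :
    GW w (setC g y x v) := by
  intro y' hy'
  rw [rowLen_setC]
  exact h y' (by rwa [length_setC] at hy')

theorem getC_oob (g : List (List String)) (y x : Nat) (h : g.length ≤ y) :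
    getC g y x = "" := by
  unfold getC
  rw [getD_oob _ _ _ h]
  simp

theorem getC_setC_self (g : List (List String)) (y x : Nat) (v : String)
    (hy : y < g.length) (hx : x < rowLen g y) :
    getC (setC g y x v) y x = v := by
  unfold getC setC
  rw [getD_set_self]
  simp only [hy, if_pos]
  rw [getD_set_self]
  simp [rowLen] at hx
  simp [hx]

theorem getC_setC_ne (g : List (List String)) (y x : Nat) (v : String) (y' x' : Nat)
    (h : y' ≠ y ∨ x' ≠ x) :
    getC (setC g y x v) y' x' = getC g y' x' := by
  unfold getC setC
  by_cases hy : y' = y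
  · rcases h with h | h
    · exact absurd hy h
    rw [hy, getD_set_self]
    split
    · rw [getD_set_ne _ _ _ _ _ h]
    · rw [getD_oob g y ([] : List String) (by omega)]
  · rw [getD_set_ne _ _ _ _ _ hy]

theorem setC_oob_row (g : List (List String)) (y x : Nat) (v : String) (h : g.length ≤ y) :
    setC g y x v = g := List.set_eq_of_length_le h

-- ---------- lines ----------

def nLines (o : Bool) (h w : Nat) : Nat := if o then w else h
def nPos (o : Bool) (h w : Nat) : Nat := if o then h else w

def lineOf (o : Bool) (g : List (List String)) (ℓ n : Nat) : List String :=
  (List.range n).map (fun i => getC g (coY o ℓ i) (coX o ℓ i))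

theorem map_range_getD {α : Type} (n : Nat) (f : Nat → α) (i : Nat) (d : α) :
    ((List.range n).map f).getD i d = if i < n then f i else d := by
  by_cases h : i < n
  · rw [List.getD_eq_getElem _ _ (by simpa using h)]
    simp [h]
  · rw [getD_oob _ _ _ (by simpa using Nat.le_of_not_lt h)]
    simp [h]

theorem lineOf_length (o : Bool) (g : List (List String)) (ℓ n : Nat) :
    (lineOf o g ℓ n).length = n := by simp [lineOf]

theorem lineOf_getD (o : Bool) (g : List (List String)) (ℓ n i : Nat) (hi : i < n) :
    (lineOf o g ℓ n).getD i "" = getC g (coY o ℓ i) (coX o ℓ i) := by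
  unfold lineOf
  rw [map_range_getD]
  simp [hi]

theorem co_ne_line (o : Bool) (ℓ i ℓ' i' : Nat) (h : ℓ ≠ ℓ') :
    coY o ℓ i ≠ coY o ℓ' i' ∨ coX o ℓ i ≠ coX o ℓ' i' := by
  cases o
  · exact Or.inl (by simpa [coY] using h)
  · exact Or.inr (by simpa [coX] using h)

theorem co_ne_pos (o : Bool) (ℓ i i' : Nat) (h : i ≠ i') :
    coY o ℓ i ≠ coY o ℓ i' ∨ coX o ℓ i ≠ coX o ℓ i' := by
  cases o
  · exact Or.inr (by simpa [coX] using h)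
  · exact Or.inl (by simpa [coY] using h)

theorem co_bounds (o : Bool) (w : Nat) (g : List (List String)) (hGW : GW w g)
    (ℓ i : Nat) (hL : ℓ < nLines o g.length w) (hi : i < nPos o g.length w) :
    coY o ℓ i < g.length ∧ coX o ℓ i < rowLen g (coY o ℓ i) := by
  cases o
  · simp [nLines, nPos] at hL hi
    simp [coY, coX]
    exact ⟨hL, Nat.lt_of_lt_of_le hi (hGW ℓ hL)⟩
  · simp [nLines, nPos] at hL hi
    simp [coY, coX]
    exact ⟨hi, Nat.lt_of_lt_of_le hL (hGW i hi)⟩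

theorem lineOf_setC_ne (o : Bool) (g : List (List String)) (ℓ ℓ' j n : Nat) (v : String)
    (h : ℓ' ≠ ℓ) :
    lineOf o (setC g (coY o ℓ' j) (coX o ℓ' j) v) ℓ n = lineOf o g ℓ n := by
  unfold lineOf
  refine List.map_congr_left (fun i _ => ?_)
  exact getC_setC_ne _ _ _ _ _ _ (co_ne_line o ℓ i ℓ' j (fun hh => h hh.symm))

theorem lineOf_setC_self (o : Bool) (g : List (List String)) (ℓ j n : Nat) (v : String)
    (hj : j < n) (hY : coY o ℓ j < g.length) (hX : coX o ℓ j < rowLen g (coY o ℓ j)) :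
    lineOf o (setC g (coY o ℓ j) (coX o ℓ j) v) ℓ n = (lineOf o g ℓ n).set j v := by
  apply List.ext_getElem
  · simp [lineOf]
  intro i h1 h2
  have hi : i < n := by simpa [lineOf] using h1
  simp only [lineOf, List.getElem_map, List.getElem_range, List.getElem_set]
  by_cases hij : j = i
  · subst hij
    simp [getC_setC_self g _ _ v hY hX]
  · rw [if_neg hij, getC_setC_ne _ _ _ _ _ _ (co_ne_pos o ℓ i j (fun h => hij h.symm))]

-- ---------- 1-D: pointer step vs segment repacking ----------

-- one time-step of the stopping-point algorithm on a single line
def lstep (bump hm : Nat → Nat) (cs : List String × Nat) (t : Nat) : List String × Nat :=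
  let cs := if cs.1.getD t "" = "O" then ((cs.1.set t ".").set cs.2 "O", bump cs.2) else cs
  if cs.1.getD t "" = "#" then (cs.1, hm t) else cs

theorem lstep_snd_cases (bump hm : Nat → Nat) (cs : List String × Nat) (t : Nat) :
    (lstep bump hm cs t).2 = cs.2 ∨ (lstep bump hm cs t).2 = bump cs.2 ∨
    (lstep bump hm cs t).2 = hm t := by
  simp only [lstep]
  split <;> split <;> simp

-- output of the pointer run, described by the settled/pending decomposition
def goRec : List String → List String → List String
  | pend, [] => pend
  | pend, c :: r =>
    if c = "#" then pend ++ "#" :: goRec [] r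
    else if c = "O" then
      "O" :: (match pend with
        | [] => goRec [] r
        | _ :: ps => goRec (ps ++ ["."]) r)
    else goRec (pend ++ [c]) r

-- recursive form of pvTiltLeft
def tl : List String → List String → List String
  | seg, [] => pvPack seg
  | seg, c :: r => if c = "#" then pvPack seg ++ "#" :: tl [] r else tl (seg ++ [c]) r

theorem tl_fold (rest : List String) : ∀ (out seg : List String),
    ((rest.foldl
        (fun (st : List String × List String) c =>
          if c = "#" then (st.1 ++ pvPack st.2 ++ ["#"], []) else (st.1, st.2 ++ [c]))
        (out, seg)).1
      ++ pvPack (rest.foldl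
        (fun (st : List String × List String) c =>
          if c = "#" then (st.1 ++ pvPack st.2 ++ ["#"], []) else (st.1, st.2 ++ [c]))
        (out, seg)).2)
    = out ++ tl seg rest := by
  induction rest with
  | nil => intro out seg; simp [tl]
  | cons c r ih =>
    intro out seg
    by_cases hc : c = "#"
    · subst hc
      simp only [List.foldl_cons, if_pos rfl, tl]
      rw [ih]
      simp
    · simp only [List.foldl_cons, if_neg hc, tl]
      rw [ih]

theorem pvTiltLeft_eq_tl (line : List String) : pvTiltLeft line = tl [] line := by
  unfold pvTiltLeft
  simpa using tl_fold line [] []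

def mapDot (l : List String) : List String := l.map (fun c => if c = "O" then "." else c)

theorem tl_goRec (rest : List String) : ∀ (seg : List String),
    tl seg rest
      = List.replicate (seg.count "O") "O" ++ goRec (mapDot (seg.drop (seg.count "O"))) rest := by
  induction rest with
  | nil =>
    intro seg
    simp [tl, pvPack, goRec, mapDot]
  | cons c r ih =>
    intro seg
    have hcnt : seg.count "O" ≤ seg.length := List.count_le_length
    by_cases hc : c = "#"
    · subst hc
      simp only [tl, if_pos rfl, goRec]
      rw [ih []]
      simp [pvPack, mapDot]
    · by_cases hO : c = "O"
      · subst hO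
        simp only [tl, goRec, if_neg hc]
        rw [ih (seg ++ ["O"])]
        have hk : (seg ++ ["O"]).count "O" = seg.count "O" + 1 := by
          simp [List.count_append]
        rw [hk]
        rcases hdk : seg.drop (seg.count "O") with _ | ⟨q, qs⟩
        · have hlen : seg.length = seg.count "O" := by
            have := congrArg List.length hdk
            simp at this
            omega
          have : (seg ++ ["O"]).drop (seg.count "O" + 1) = ([] : List String) := by
            apply List.drop_eq_nil_of_le
            simp [hlen]
          rw [this]
          simp [mapDot, List.replicate_succ' (n := seg.count "O")]
        · have hlt : seg.count "O" < seg.length := by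
            have := congrArg List.length hdk
            simp at this
            omega
          have hdrop : (seg ++ ["O"]).drop (seg.count "O" + 1)
              = seg.drop (seg.count "O" + 1) ++ ["O"] := by
            rw [List.drop_append_of_le_length (by omega)]
          have hqs : seg.drop (seg.count "O" + 1) = qs := by
            have : seg.drop (seg.count "O" + 1) = (seg.drop (seg.count "O")).drop 1 := by
              rw [List.drop_drop]
            rw [this, hdk]
            simp
          rw [hdrop, hqs]
          simp only [mapDot, List.map_append, hdk]
          simp [List.replicate_succ' (n := seg.count "O")]
      · simp only [tl, if_neg hc, goRec]
        rw [ih (seg ++ [c])]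
        have hk : (seg ++ [c]).count "O" = seg.count "O" := by
          simp [List.count_append, List.count_singleton, hO]
        rw [hk]
        have hdrop : (seg ++ [c]).drop (seg.count "O") = seg.drop (seg.count "O") ++ [c] := by
          rw [List.drop_append_of_le_length hcnt]
        rw [hdrop]
        simp [mapDot, hO, hc]

theorem goRec_eq_tiltLeft (line : List String) : goRec [] line = pvTiltLeft line := by
  rw [pvTiltLeft_eq_tl, tl_goRec]
  simp [mapDot]

theorem getD_append_mid (a b : List String) (c d : String) :
    (a ++ c :: b).getD a.length d = c := by
  simp [List.getD_eq_getElem?_getD]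

theorem set_append_mid (a b : List String) (c v : String) :
    (a ++ c :: b).set a.length v = a ++ v :: b := by
  simp

theorem lstep_eval (bump hm : Nat → Nat) (l : List String) (s t : Nat) :
    lstep bump hm (l, s) t =
      if l.getD t "" = "O" then
        (if ((l.set t ".").set s "O").getD t "" = "#" then (((l.set t ".").set s "O"), hm t)
         else (((l.set t ".").set s "O"), bump s))
      else (if l.getD t "" = "#" then (l, hm t) else (l, s)) := by
  simp only [lstep]
  split
  · rfl
  · rfl

theorem goRec_hash (pend r : List String) :
    goRec pend ("#" :: r) = pend ++ "#" :: goRec [] r := by simp [goRec]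

theorem goRec_O_nil (r : List String) : goRec [] ("O" :: r) = "O" :: goRec [] r := by
  simp [goRec]

theorem goRec_O_cons (p : String) (ps r : List String) :
    goRec (p :: ps) ("O" :: r) = "O" :: goRec (ps ++ ["."]) r := by
  simp [goRec]

theorem goRec_other (pend r : List String) (c : String) (hO : c ≠ "O") (hH : c ≠ "#") :
    goRec pend (c :: r) = goRec (pend ++ [c]) r := by simp [goRec, hO, hH]

-- forward pointer run (tilt toward index 0)
theorem auxF (rest : List String) : ∀ (out pend : List String),
    (∀ c ∈ pend, c ≠ "O" ∧ c ≠ "#") →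
    ((List.range' (out.length + pend.length) rest.length).foldl
        (lstep (· + 1) (· + 1)) (out ++ pend ++ rest, out.length)).1
      = out ++ goRec pend rest := by
  induction rest with
  | nil => intro out pend hp; simp [goRec]
  | cons c r ih =>
    intro out pend hp
    have hread : (out ++ (pend ++ (c :: r))).getD (out.length + pend.length) "" = c := by
      simpa using getD_append_mid (out ++ pend) r c ""
    simp only [List.length_cons, List.range'_succ, List.foldl_cons, List.append_assoc]
    rw [lstep_eval, hread]
    by_cases hO : c = "O"
    · subst hO
      rw [if_pos rfl]
      have hset1 : ((out ++ (pend ++ ("O" : String) :: r)).set (out.length + pend.length) ".")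
          = out ++ (pend ++ ("." : String) :: r) := by
        simpa using set_append_mid (out ++ pend) r "O" "."
      rw [hset1]
      cases pend with
      | nil =>
        have hset2 : ((out ++ ([] ++ ("." : String) :: r)).set out.length "O")
            = out ++ (("O" : String) :: r) := by
          simpa using set_append_mid out r "." "O"
        rw [hset2]
        have hread2 : (out ++ (("O" : String) :: r)).getD (out.length + List.length ([] : List String)) ""
            = "O" := by simpa using getD_append_mid out r "O" ""
        rw [hread2, if_neg (by decide)]
        have hih := ih (out ++ ["O"]) [] (by simp)
        simp only [List.append_assoc, List.cons_append, List.nil_append, List.append_nil,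
          List.length_append, List.length_cons, List.length_nil, Nat.add_zero,
          Nat.add_assoc, Nat.add_comm, Nat.add_left_comm] at hih ⊢
        rw [hih, goRec_O_nil]
      | cons p ps =>
        have hset2 : ((out ++ ((p :: ps) ++ ("." : String) :: r)).set out.length "O")
            = out ++ (("O" : String) :: (ps ++ ("." : String) :: r)) := by
          simpa using set_append_mid out (ps ++ ("." : String) :: r) p "O"
        rw [hset2]
        have hread2 : (out ++ (("O" : String) :: (ps ++ ("." : String) :: r))).getD
            (out.length + (p :: ps).length) "" = "." := by
          have h := getD_append_mid (out ++ ("O" : String) :: ps) r "." ""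
          simp only [List.append_assoc, List.cons_append, List.length_append,
            List.length_cons, Nat.add_assoc, Nat.add_comm, Nat.add_left_comm] at h ⊢
          exact h
        rw [hread2, if_neg (by decide)]
        have hps : ∀ d ∈ ps ++ ["."], d ≠ "O" ∧ d ≠ "#" := by
          intro d hd
          rcases List.mem_append.1 hd with h | h
          · exact hp d (List.mem_cons_of_mem p h)
          · simp at h; subst h; exact ⟨by decide, by decide⟩
        have hih := ih (out ++ ["O"]) (ps ++ ["."]) hps
        simp only [List.append_assoc, List.cons_append, List.nil_append, List.append_nil,
          List.length_append, List.length_cons, List.length_nil, Nat.add_zero,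
          Nat.add_assoc, Nat.add_comm, Nat.add_left_comm] at hih ⊢
        rw [hih, goRec_O_cons]
    · rw [if_neg hO]
      by_cases hH : c = "#"
      · subst hH
        rw [if_pos rfl]
        have hih := ih (out ++ pend ++ ["#"]) [] (by simp)
        simp only [List.append_assoc, List.cons_append, List.nil_append, List.append_nil,
          List.length_append, List.length_cons, List.length_nil, Nat.add_zero,
          Nat.add_assoc, Nat.add_comm, Nat.add_left_comm] at hih ⊢
        rw [hih, goRec_hash]
      · rw [if_neg hH]
        have hps : ∀ d ∈ pend ++ [c], d ≠ "O" ∧ d ≠ "#" := by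
          intro d hd
          rcases List.mem_append.1 hd with h | h
          · exact hp d h
          · simp at h; subst h; exact ⟨hO, hH⟩
        have hih := ih out (pend ++ [c]) hps
        simp only [List.append_assoc, List.cons_append, List.nil_append, List.append_nil,
          List.length_append, List.length_cons, List.length_nil, Nat.add_zero,
          Nat.add_assoc, Nat.add_comm, Nat.add_left_comm] at hih ⊢
        rw [hih, goRec_other pend r c hO hH]

-- backward pointer run (tilt toward the last index)
theorem auxB (rrev : List String) : ∀ (pend out : List String),
    (∀ c ∈ pend, c ≠ "O" ∧ c ≠ "#") →
    (((List.range rrev.length).reverse).foldl (lstep (· - 1) (· - 1))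
        (rrev.reverse ++ (pend ++ out), rrev.length + pend.length - 1)).1
      = (goRec pend.reverse rrev).reverse ++ out := by
  induction rrev with
  | nil => intro pend out hp; simp [goRec]
  | cons c rr ih =>
    intro pend out hp
    have hs : (c :: rr).length + pend.length - 1 = rr.length + pend.length := by simp
    rw [hs]
    simp only [List.length_cons, List.range_succ, List.reverse_append, List.reverse_cons,
      List.reverse_nil, List.nil_append, List.cons_append, List.foldl_cons, List.append_assoc]
    have hread : (rr.reverse ++ (c :: (pend ++ out))).getD rr.length "" = c := by
      simpa using getD_append_mid rr.reverse (pend ++ out) c ""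
    rw [lstep_eval, hread]
    by_cases hO : c = "O"
    · subst hO
      rw [if_pos rfl]
      have hset1 : ((rr.reverse ++ (("O" : String) :: (pend ++ out))).set rr.length ".")
          = rr.reverse ++ (("." : String) :: (pend ++ out)) := by
        simpa using set_append_mid rr.reverse (pend ++ out) "O" "."
      rw [hset1]
      rcases List.eq_nil_or_concat pend with rfl | ⟨ps, q, rfl⟩
      · simp only [List.length_nil, Nat.add_zero, List.nil_append]
        have hset2 : ((rr.reverse ++ (("." : String) :: out)).set rr.length "O")
            = rr.reverse ++ (("O" : String) :: out) := by
          simpa using set_append_mid rr.reverse out "." "O"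
        rw [hset2]
        have hread2 : (rr.reverse ++ (("O" : String) :: out)).getD rr.length "" = "O" := by
          simpa using getD_append_mid rr.reverse out "O" ""
        rw [hread2, if_neg (by decide)]
        have hih := ih [] (("O" : String) :: out) (by simp)
        simp only [List.reverse_nil, List.nil_append, List.length_nil, Nat.add_zero] at hih
        rw [hih]
        simp [goRec_O_nil]
      · simp only [List.concat_eq_append, List.length_append, List.length_cons,
          List.length_nil, Nat.add_zero, List.append_assoc, List.cons_append, List.nil_append]
        rw [show rr.length + (ps.length + 1) = (rr.reverse ++ ("." : String) :: ps).length from by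
          simp]
        rw [show rr.reverse ++ ("." : String) :: (ps ++ q :: out)
            = (rr.reverse ++ ("." : String) :: ps) ++ (q :: out) from by simp]
        rw [set_append_mid (rr.reverse ++ ("." : String) :: ps) out q "O"]
        rw [show (rr.reverse ++ ("." : String) :: ps) ++ (("O" : String) :: out)
            = rr.reverse ++ ("." : String) :: (ps ++ ("O" : String) :: out) from by simp]
        have hread2 : (rr.reverse ++ ("." : String) :: (ps ++ ("O" : String) :: out)).getD
            rr.length "" = "." := by
          simpa using getD_append_mid rr.reverse (ps ++ ("O" : String) :: out) "." ""
        rw [hread2, if_neg (by decide)]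
        have hps : ∀ d ∈ ("." : String) :: ps, d ≠ "O" ∧ d ≠ "#" := by
          intro d hd
          rcases List.mem_cons.1 hd with h | h
          · subst h; exact ⟨by decide, by decide⟩
          · exact hp d (by simp [List.concat_eq_append, List.mem_append, h])
        have hih := ih (("." : String) :: ps) (("O" : String) :: out) hps
        simp only [List.reverse_cons, List.length_cons, List.append_assoc,
          List.cons_append] at hih
        rw [show (rr.reverse ++ ("." : String) :: ps).length - 1
            = rr.length + (ps.length + 1) - 1 from by simp]
        rw [hih]
        rw [show (ps ++ [q]).reverse = q :: ps.reverse from by simp]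
        rw [goRec_O_cons]
        simp
    · rw [if_neg hO]
      by_cases hH : c = "#"
      · subst hH
        rw [if_pos rfl]
        have hih := ih [] (("#" : String) :: (pend ++ out)) (by simp)
        simp only [List.reverse_nil, List.nil_append, List.length_nil, Nat.add_zero] at hih
        rw [hih, goRec_hash]
        simp
      · rw [if_neg hH]
        have hps : ∀ d ∈ c :: pend, d ≠ "O" ∧ d ≠ "#" := by
          intro d hd
          rcases List.mem_cons.1 hd with h | h
          · subst h; exact ⟨hO, hH⟩
          · exact hp d h
        have hih := ih (c :: pend) out hps
        simp only [List.reverse_cons, List.length_cons, List.append_assoc,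
          List.cons_append] at hih
        rw [show rr.length + (pend.length + 1) - 1 = rr.length + pend.length from by
          omega] at hih
        rw [hih, goRec_other _ _ _ hO hH]

-- full-line runs
theorem runF_eq (line : List String) :
    ((List.range line.length).foldl (lstep (· + 1) (· + 1)) (line, 0)).1 = pvTiltLeft line := by
  have h := auxF line [] [] (by simp)
  simp only [List.nil_append, List.length_nil, Nat.add_zero, Nat.zero_add] at h
  rw [List.range_eq_range']
  rw [h, goRec_eq_tiltLeft]

theorem runB_eq (line : List String) :
    (((List.range line.length).reverse).foldl (lstep (· - 1) (· - 1)) (line, line.length - 1)).1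
      = (pvTiltLeft line.reverse).reverse := by
  have h := auxB line.reverse [] [] (by simp)
  simp only [List.reverse_reverse, List.append_nil, List.nil_append, List.length_reverse,
    List.length_nil, Nat.add_zero, List.reverse_nil] at h
  rw [h, goRec_eq_tiltLeft]

theorem pvPack_length (seg : List String) : (pvPack seg).length = seg.length := by
  have h : seg.count "O" ≤ seg.length := List.count_le_length
  simp [pvPack]
  omega

theorem tl_length (rest : List String) : ∀ seg, (tl seg rest).length = seg.length + rest.length := by
  induction rest with
  | nil => intro seg; simp [tl, pvPack_length]
  | cons c r ih =>
    intro seg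
    by_cases hc : c = "#"
    · subst hc; simp [tl, pvPack_length, ih]
    · simp [tl, hc, ih]; omega

theorem pvTiltLeft_length (line : List String) : (pvTiltLeft line).length = line.length := by
  rw [pvTiltLeft_eq_tl, tl_length]
  simp

-- ---------- one inner-loop step of A acts on a single line ----------

theorem astep_eval (o : Bool) (bump hm : Nat → Nat) (t : Nat)
    (g : List (List String)) (sp : List Nat) (ℓ : Nat) :
    astep o bump hm t (g, sp) ℓ =
      if getC g (coY o ℓ t) (coX o ℓ t) = "O" then
        (if getC (setC (setC g (coY o ℓ t) (coX o ℓ t) ".")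
              (coY o ℓ (sp.getD ℓ 0)) (coX o ℓ (sp.getD ℓ 0)) "O") (coY o ℓ t) (coX o ℓ t) = "#"
         then (setC (setC g (coY o ℓ t) (coX o ℓ t) ".")
              (coY o ℓ (sp.getD ℓ 0)) (coX o ℓ (sp.getD ℓ 0)) "O",
              (sp.set ℓ (bump (sp.getD ℓ 0))).set ℓ (hm t))
         else (setC (setC g (coY o ℓ t) (coX o ℓ t) ".")
              (coY o ℓ (sp.getD ℓ 0)) (coX o ℓ (sp.getD ℓ 0)) "O",
              sp.set ℓ (bump (sp.getD ℓ 0))))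
      else (if getC g (coY o ℓ t) (coX o ℓ t) = "#" then (g, sp.set ℓ (hm t)) else (g, sp)) := by
  by_cases hP : getC g (coY o ℓ t) (coX o ℓ t) = "O" <;> simp [astep, hP]

theorem astep_sim (o : Bool) (bump hm : Nat → Nat) (w t : Nat)
    (g : List (List String)) (sp : List Nat) (ℓ : Nat)
    (hGW : GW w g) (hsplen : sp.length = nLines o g.length w)
    (ht : t < nPos o g.length w) (hk : ℓ < nLines o g.length w)
    (hsℓ : o = false → sp.getD ℓ 0 < nPos o g.length w) :
    (astep o bump hm t (g, sp) ℓ).1.length = g.length ∧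
    (∀ y, rowLen (astep o bump hm t (g, sp) ℓ).1 y = rowLen g y) ∧
    (astep o bump hm t (g, sp) ℓ).2.length = sp.length ∧
    lineOf o (astep o bump hm t (g, sp) ℓ).1 ℓ (nPos o g.length w)
      = (lstep bump hm (lineOf o g ℓ (nPos o g.length w), sp.getD ℓ 0) t).1 ∧
    (astep o bump hm t (g, sp) ℓ).2.getD ℓ 0
      = (lstep bump hm (lineOf o g ℓ (nPos o g.length w), sp.getD ℓ 0) t).2 ∧
    (∀ ℓ', ℓ' ≠ ℓ →
      lineOf o (astep o bump hm t (g, sp) ℓ).1 ℓ' (nPos o g.length w)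
        = lineOf o g ℓ' (nPos o g.length w) ∧
      (astep o bump hm t (g, sp) ℓ).2.getD ℓ' 0 = sp.getD ℓ' 0) ∧
    (∀ y x, w ≤ x → getC (astep o bump hm t (g, sp) ℓ).1 y x = getC g y x) := by
  have hb1 := co_bounds o w g hGW ℓ t hk ht
  have hread : (lineOf o g ℓ (nPos o g.length w)).getD t "" = getC g (coY o ℓ t) (coX o ℓ t) :=
    lineOf_getD o g ℓ _ t ht
  have hxt : coX o ℓ t < w := by
    cases o
    · simpa [coX, nPos] using ht
    · simpa [coX, nLines] using hk
  rw [astep_eval, lstep_eval]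
  by_cases hc : getC g (coY o ℓ t) (coX o ℓ t) = "O"
  · rw [if_pos hc, if_pos (hread.trans hc)]
    have hlen2 : (setC g (coY o ℓ t) (coX o ℓ t) ".").length = g.length := length_setC ..
    have hGW2 : GW w (setC g (coY o ℓ t) (coX o ℓ t) ".") := GW_setC _ _ _ _ _ hGW
    have hline2 : lineOf o (setC g (coY o ℓ t) (coX o ℓ t) ".") ℓ (nPos o g.length w)
        = (lineOf o g ℓ (nPos o g.length w)).set t "." :=
      lineOf_setC_self o g ℓ t _ "." ht hb1.1 hb1.2
    have hxs : o = false → coX o ℓ (sp.getD ℓ 0) < w := by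
      intro ho; subst ho
      simpa [coX, nPos] using hsℓ rfl
    have hline3 : lineOf o (setC (setC g (coY o ℓ t) (coX o ℓ t) ".")
          (coY o ℓ (sp.getD ℓ 0)) (coX o ℓ (sp.getD ℓ 0)) "O") ℓ (nPos o g.length w)
        = ((lineOf o g ℓ (nPos o g.length w)).set t ".").set (sp.getD ℓ 0) "O" := by
      by_cases hsN : sp.getD ℓ 0 < nPos o g.length w
      · have hk2 : ℓ < nLines o (setC g (coY o ℓ t) (coX o ℓ t) ".").length w := by
          rwa [hlen2]
        have hsN2 : sp.getD ℓ 0 < nPos o (setC g (coY o ℓ t) (coX o ℓ t) ".").length w := by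
          rwa [hlen2]
        have hb2 := co_bounds o w _ hGW2 ℓ (sp.getD ℓ 0) hk2 hsN2
        rw [lineOf_setC_self o _ ℓ (sp.getD ℓ 0) _ "O" (by rwa [hlen2] at hsN2) hb2.1 hb2.2,
          hline2]
      · have ho : o = true := by
          cases o
          · exact absurd (hsℓ rfl) hsN
          · rfl
        subst ho
        have hsge : g.length ≤ sp.getD ℓ 0 := by simpa [nPos] using Nat.le_of_not_lt hsN
        have hge : (setC g (coY true ℓ t) (coX true ℓ t) ".").length ≤ coY true ℓ (sp.getD ℓ 0) := by
          rw [hlen2]; simpa [coY] using hsge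
        have hlen3 : ((lineOf true g ℓ (nPos true g.length w)).set t ".").length ≤ sp.getD ℓ 0 := by
          rw [List.length_set, lineOf_length]; simpa [nPos] using hsge
        rw [setC_oob_row _ _ _ _ hge, hline2, List.set_eq_of_length_le hlen3]
    have hread3 : getC (setC (setC g (coY o ℓ t) (coX o ℓ t) ".")
          (coY o ℓ (sp.getD ℓ 0)) (coX o ℓ (sp.getD ℓ 0)) "O") (coY o ℓ t) (coX o ℓ t)
        = (((lineOf o g ℓ (nPos o g.length w)).set t ".").set (sp.getD ℓ 0) "O").getD t "" := by
      rw [← lineOf_getD o _ ℓ _ t ht, hline3]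
    rw [hread3]
    have hspl : ℓ < sp.length := by omega
    have hxs2 : coX o ℓ (sp.getD ℓ 0) < w := by
      cases o
      · exact hxs rfl
      · simpa [coX, nLines] using hk
    by_cases hc2 : (((lineOf o g ℓ (nPos o g.length w)).set t ".").set (sp.getD ℓ 0) "O").getD t "" = "#"
    · rw [if_pos hc2, if_pos hc2]
      refine ⟨by simp [length_setC], fun y => by simp [rowLen_setC], by simp, hline3, ?_, ?_, ?_⟩
      · simp [getD_set_self, hspl]
      · intro ℓ' hℓ'
        exact ⟨by dsimp only; rw [lineOf_setC_ne o _ _ _ _ _ _ (Ne.symm hℓ'),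
            lineOf_setC_ne o _ _ _ _ _ _ (Ne.symm hℓ')],
          by dsimp only; rw [getD_set_ne _ _ _ _ _ hℓ', getD_set_ne _ _ _ _ _ hℓ']⟩
      · intro y x hx
        rw [getC_setC_ne _ _ _ _ _ _ (Or.inr (by have := hxs; cases o <;> [skip; skip] <;> omega)),
          getC_setC_ne _ _ _ _ _ _ (Or.inr (by omega))]
    · rw [if_neg hc2, if_neg hc2]
      refine ⟨by simp [length_setC], fun y => by simp [rowLen_setC], by simp, hline3, ?_, ?_, ?_⟩
      · simp [getD_set_self, hspl]
      · intro ℓ' hℓ'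
        exact ⟨by dsimp only; rw [lineOf_setC_ne o _ _ _ _ _ _ (Ne.symm hℓ'),
            lineOf_setC_ne o _ _ _ _ _ _ (Ne.symm hℓ')],
          by dsimp only; rw [getD_set_ne _ _ _ _ _ hℓ']⟩
      · intro y x hx
        dsimp only
        rw [getC_setC_ne _ _ _ _ _ _ (Or.inr (by omega)),
          getC_setC_ne _ _ _ _ _ _ (Or.inr (by omega))]
  · rw [if_neg hc, if_neg (fun h => hc (hread.symm.trans h))]
    have hspl : ℓ < sp.length := by omega
    by_cases hc2 : getC g (coY o ℓ t) (coX o ℓ t) = "#"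
    · rw [if_pos hc2, if_pos (hread.trans hc2)]
      refine ⟨rfl, fun y => rfl, by simp, rfl, ?_, ?_, fun y x hx => rfl⟩
      · simp [getD_set_self, hspl]
      · intro ℓ' hℓ'
        exact ⟨rfl, by dsimp only; rw [getD_set_ne _ _ _ _ _ hℓ']⟩
    · rw [if_neg hc2, if_neg (fun h => hc2 (hread.symm.trans h))]
      exact ⟨rfl, fun y => rfl, rfl, rfl, rfl, fun ℓ' _ => ⟨rfl, rfl⟩, fun y x hx => rfl⟩

theorem getD_replicate {α : Type} (n i : Nat) (a : α) : (List.replicate n a).getD i a = a := by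
  rcases Nat.lt_or_ge i n with h | h
  · rw [List.getD_eq_getElem _ _ (by simpa using h)]
    simp
  · rw [getD_oob _ _ _ (by simpa using h)]

theorem inner_aux (o : Bool) (bump hm : Nat → Nat) (w t : Nat)
    (g : List (List String)) (sp : List Nat)
    (hGW : GW w g) (hsplen : sp.length = nLines o g.length w)
    (ht : t < nPos o g.length w)
    (hsp : ∀ ℓ, ℓ < nLines o g.length w → o = false → sp.getD ℓ 0 < nPos o g.length w) :
    ∀ k, k ≤ nLines o g.length w →
      ((List.range k).foldl (astep o bump hm t) (g, sp)).1.length = g.length ∧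
      (∀ y, rowLen ((List.range k).foldl (astep o bump hm t) (g, sp)).1 y = rowLen g y) ∧
      ((List.range k).foldl (astep o bump hm t) (g, sp)).2.length = sp.length ∧
      (∀ ℓ, k ≤ ℓ →
        lineOf o ((List.range k).foldl (astep o bump hm t) (g, sp)).1 ℓ (nPos o g.length w)
          = lineOf o g ℓ (nPos o g.length w) ∧
        ((List.range k).foldl (astep o bump hm t) (g, sp)).2.getD ℓ 0 = sp.getD ℓ 0) ∧
      (∀ ℓ, ℓ < k →
        lineOf o ((List.range k).foldl (astep o bump hm t) (g, sp)).1 ℓ (nPos o g.length w)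
          = (lstep bump hm (lineOf o g ℓ (nPos o g.length w), sp.getD ℓ 0) t).1 ∧
        ((List.range k).foldl (astep o bump hm t) (g, sp)).2.getD ℓ 0
          = (lstep bump hm (lineOf o g ℓ (nPos o g.length w), sp.getD ℓ 0) t).2) ∧
      (∀ y x, w ≤ x →
        getC ((List.range k).foldl (astep o bump hm t) (g, sp)).1 y x = getC g y x) := by
  intro k
  induction k with
  | zero =>
    intro _
    simp
  | succ k ihk =>
    intro hk1
    obtain ⟨h1, h2, h3, h4, h5, h6⟩ := ihk (by omega)
    rw [List.range_succ, List.foldl_append, List.foldl_cons, List.foldl_nil]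
    rcases hF : (List.range k).foldl (astep o bump hm t) (g, sp) with ⟨G1, S1⟩
    rw [hF] at h1 h2 h3 h4 h5 h6
    dsimp only at h1 h2 h3 h4 h5 h6
    have hGW1 : GW w G1 := fun y hy => by rw [h2]; exact hGW y (h1 ▸ hy)
    have hs1 : o = false → S1.getD k 0 < nPos o g.length w := fun ho => by
      rw [(h4 k le_rfl).2]; exact hsp k (by omega) ho
    have hsim := astep_sim o bump hm w t G1 S1 k hGW1
      (by rw [h1, h3, hsplen]) (by rw [h1]; exact ht) (by rw [h1]; omega)
      (by rw [h1]; exact hs1)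
    have hN : nPos o G1.length w = nPos o g.length w := by rw [h1]
    obtain ⟨s1, s2, s3, s4, s5, s6, s7⟩ := hsim
    rw [hN] at s4 s5 s6
    rw [(h4 k le_rfl).1, (h4 k le_rfl).2] at s4 s5
    refine ⟨by rw [s1, h1], fun y => by rw [s2 y, h2 y], by rw [s3, h3], ?_, ?_, ?_⟩
    · intro ℓ hℓ
      have hne : ℓ ≠ k := by omega
      exact ⟨by rw [(s6 ℓ hne).1, (h4 ℓ (by omega)).1],
        by rw [(s6 ℓ hne).2, (h4 ℓ (by omega)).2]⟩
    · intro ℓ hℓ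
      by_cases hℓk : ℓ = k
      · subst hℓk
        exact ⟨s4, s5⟩
      · exact ⟨by rw [(s6 ℓ hℓk).1, (h5 ℓ (by omega)).1],
          by rw [(s6 ℓ hℓk).2, (h5 ℓ (by omega)).2]⟩
    · intro y x hx
      rw [s7 y x hx, h6 y x hx]

theorem sboundF (T : Nat) (line : List String) :
    ((List.range T).foldl (lstep (· + 1) (· + 1)) (line, 0)).2 ≤ T := by
  induction T with
  | zero => simp
  | succ T ih =>
    rw [List.range_succ, List.foldl_append, List.foldl_cons, List.foldl_nil]
    rcases lstep_snd_cases (· + 1) (· + 1)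
        ((List.range T).foldl (lstep (· + 1) (· + 1)) (line, 0)) T with h | h | h <;>
      rw [h] <;> omega

theorem outerF (o : Bool) (w : Nat) (T : Nat) (g : List (List String))
    (hGW : GW w g) (hT : T ≤ nPos o g.length w) :
    ((List.range T).foldl
        (fun st t => (List.range (nLines o g.length w)).foldl (astep o (· + 1) (· + 1) t) st)
        (g, List.replicate (nLines o g.length w) 0)).1.length = g.length ∧
    (∀ y, rowLen ((List.range T).foldl
        (fun st t => (List.range (nLines o g.length w)).foldl (astep o (· + 1) (· + 1) t) st)
        (g, List.replicate (nLines o g.length w) 0)).1 y = rowLen g y) ∧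
    ((List.range T).foldl
        (fun st t => (List.range (nLines o g.length w)).foldl (astep o (· + 1) (· + 1) t) st)
        (g, List.replicate (nLines o g.length w) 0)).2.length = nLines o g.length w ∧
    (∀ ℓ, ℓ < nLines o g.length w →
      lineOf o ((List.range T).foldl
        (fun st t => (List.range (nLines o g.length w)).foldl (astep o (· + 1) (· + 1) t) st)
        (g, List.replicate (nLines o g.length w) 0)).1 ℓ (nPos o g.length w)
        = ((List.range T).foldl (lstep (· + 1) (· + 1))
            (lineOf o g ℓ (nPos o g.length w), 0)).1 ∧
      ((List.range T).foldl
        (fun st t => (List.range (nLines o g.length w)).foldl (astep o (· + 1) (· + 1) t) st)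
        (g, List.replicate (nLines o g.length w) 0)).2.getD ℓ 0
        = ((List.range T).foldl (lstep (· + 1) (· + 1))
            (lineOf o g ℓ (nPos o g.length w), 0)).2) ∧
    (∀ y x, w ≤ x → getC ((List.range T).foldl
        (fun st t => (List.range (nLines o g.length w)).foldl (astep o (· + 1) (· + 1) t) st)
        (g, List.replicate (nLines o g.length w) 0)).1 y x = getC g y x) := by
  induction T with
  | zero =>
    refine ⟨by simp, fun y => by simp, by simp, ?_, fun y x hx => by simp⟩
    intro ℓ hℓ
    exact ⟨rfl, getD_replicate _ _ _⟩
  | succ T ih =>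
    obtain ⟨h1, h2, h3, h4, h5⟩ := ih (by omega)
    rw [List.range_succ, List.foldl_append, List.foldl_cons, List.foldl_nil]
    rcases hF : (List.range T).foldl
        (fun st t => (List.range (nLines o g.length w)).foldl (astep o (· + 1) (· + 1) t) st)
        (g, List.replicate (nLines o g.length w) 0) with ⟨G1, S1⟩
    rw [hF] at h1 h2 h3 h4 h5
    dsimp only at h1 h2 h3 h4 h5
    have hGW1 : GW w G1 := fun y hy => by rw [h2]; exact hGW y (h1 ▸ hy)
    have hsp1 : ∀ ℓ, ℓ < nLines o G1.length w → o = false →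
        S1.getD ℓ 0 < nPos o G1.length w := by
      intro ℓ hℓ _
      rw [h1] at hℓ ⊢
      rw [(h4 ℓ hℓ).2]
      exact Nat.lt_of_le_of_lt (sboundF T _) (by omega)
    have hinner := inner_aux o (· + 1) (· + 1) w T G1 S1 hGW1
      (by rw [h1, h3]) (by rw [h1]; omega) hsp1 (nLines o G1.length w) le_rfl
    have hL : nLines o G1.length w = nLines o g.length w := by rw [h1]
    have hN : nPos o G1.length w = nPos o g.length w := by rw [h1]
    rw [hL, hN] at hinner
    obtain ⟨s1, s2, s3, s4, s5, s6⟩ := hinner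
    refine ⟨by rw [s1, h1], fun y => by rw [s2 y, h2 y], by rw [s3, h3], ?_, ?_⟩
    · intro ℓ hℓ
      obtain ⟨e1, e2⟩ := s5 ℓ hℓ
      rw [(h4 ℓ hℓ).1, (h4 ℓ hℓ).2] at e1 e2
      rw [Prod.mk.eta] at e1 e2
      rw [List.foldl_append, List.foldl_cons, List.foldl_nil]
      exact ⟨e1, e2⟩
    · intro y x hx
      rw [s6 y x hx, h5 y x hx]

theorem outerB (o : Bool) (w : Nat) (T : Nat) :
    ∀ (g : List (List String)) (sp : List Nat), GW w g →
    sp.length = nLines o g.length w → T ≤ nPos o g.length w →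
    (∀ ℓ, ℓ < nLines o g.length w → sp.getD ℓ 0 ≤ nPos o g.length w - 1) →
    (((List.range T).reverse).foldl
        (fun st t => (List.range (nLines o g.length w)).foldl (astep o (· - 1) (· - 1) t) st)
        (g, sp)).1.length = g.length ∧
    (∀ y, rowLen (((List.range T).reverse).foldl
        (fun st t => (List.range (nLines o g.length w)).foldl (astep o (· - 1) (· - 1) t) st)
        (g, sp)).1 y = rowLen g y) ∧
    (∀ ℓ, ℓ < nLines o g.length w →
      lineOf o (((List.range T).reverse).foldl
        (fun st t => (List.range (nLines o g.length w)).foldl (astep o (· - 1) (· - 1) t) st)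
        (g, sp)).1 ℓ (nPos o g.length w)
        = (((List.range T).reverse).foldl (lstep (· - 1) (· - 1))
            (lineOf o g ℓ (nPos o g.length w), sp.getD ℓ 0)).1) ∧
    (∀ y x, w ≤ x → getC (((List.range T).reverse).foldl
        (fun st t => (List.range (nLines o g.length w)).foldl (astep o (· - 1) (· - 1) t) st)
        (g, sp)).1 y x = getC g y x) := by
  induction T with
  | zero =>
    intro g sp hGW hsplen hT hsp
    exact ⟨by simp, fun y => by simp, fun ℓ hℓ => by simp, fun y x hx => by simp⟩
  | succ T ih =>
    intro g sp hGW hsplen hT hsp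
    have hrev : (List.range (T + 1)).reverse = T :: (List.range T).reverse := by
      rw [List.range_succ, List.reverse_append]
      simp
    rw [hrev]
    simp only [List.foldl_cons]
    have hinner := inner_aux o (· - 1) (· - 1) w T g sp hGW hsplen (by omega)
      (fun ℓ hℓ _ => by have := hsp ℓ hℓ; omega) (nLines o g.length w) le_rfl
    obtain ⟨s1, s2, s3, s4, s5, s6⟩ := hinner
    rcases hF : (List.range (nLines o g.length w)).foldl (astep o (· - 1) (· - 1) T) (g, sp)
      with ⟨G1, S1⟩
    rw [hF] at s1 s2 s3 s4 s5 s6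
    dsimp only at s1 s2 s3 s4 s5 s6
    have hGW1 : GW w G1 := fun y hy => by rw [s2]; exact hGW y (s1 ▸ hy)
    have hL : nLines o G1.length w = nLines o g.length w := by rw [s1]
    have hN : nPos o G1.length w = nPos o g.length w := by rw [s1]
    have hbound : ∀ ℓ, ℓ < nLines o G1.length w → S1.getD ℓ 0 ≤ nPos o G1.length w - 1 := by
      intro ℓ hℓ
      rw [hL] at hℓ
      rw [hN, (s5 ℓ hℓ).2]
      rcases lstep_snd_cases (· - 1) (· - 1)
          (lineOf o g ℓ (nPos o g.length w), sp.getD ℓ 0) T with h | h | h <;>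
        rw [h] <;> have := hsp ℓ hℓ <;> [omega; (dsimp only; omega); omega]
    have hih := ih G1 S1 hGW1 (by rw [hL, s3, hsplen]) (by rw [hN]; omega) hbound
    rw [hL, hN] at hih
    obtain ⟨h1, h2, h3, h4⟩ := hih
    refine ⟨by rw [h1, s1], fun y => by rw [h2 y, s2 y], ?_, ?_⟩
    · intro ℓ hℓ
      rw [h3 ℓ hℓ]
      have e1 := (s5 ℓ hℓ).1
      have e2 := (s5 ℓ hℓ).2
      rw [e1, e2, Prod.mk.eta]
    · intro y x hx
      rw [h4 y x hx, s6 y x hx]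

theorem bwrite (o : Bool) (w : Nat) (g : List (List String)) (ℓ : Nat) (col : List String)
    (hGW : GW w g) (hk : ℓ < nLines o g.length w) :
    ∀ j, j ≤ nPos o g.length w →
      ((List.range j).foldl
          (fun g i => setC g (coY o ℓ i) (coX o ℓ i) (col.getD i "")) g).length = g.length ∧
      (∀ y, rowLen ((List.range j).foldl
          (fun g i => setC g (coY o ℓ i) (coX o ℓ i) (col.getD i "")) g) y = rowLen g y) ∧
      (∀ i, i < nPos o g.length w →
        (lineOf o ((List.range j).foldl
            (fun g i => setC g (coY o ℓ i) (coX o ℓ i) (col.getD i "")) g) ℓ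
            (nPos o g.length w)).getD i ""
          = if i < j then col.getD i ""
            else (lineOf o g ℓ (nPos o g.length w)).getD i "") ∧
      (∀ ℓ', ℓ' ≠ ℓ →
        lineOf o ((List.range j).foldl
            (fun g i => setC g (coY o ℓ i) (coX o ℓ i) (col.getD i "")) g) ℓ'
            (nPos o g.length w)
          = lineOf o g ℓ' (nPos o g.length w)) ∧
      (∀ y x, w ≤ x → getC ((List.range j).foldl
          (fun g i => setC g (coY o ℓ i) (coX o ℓ i) (col.getD i "")) g) y x = getC g y x) := by
  intro j
  induction j with
  | zero =>
    intro _
    exact ⟨rfl, fun y => rfl, fun i hi => by simp, fun ℓ' _ => rfl, fun y x hx => rfl⟩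
  | succ j ihj =>
    intro hj1
    obtain ⟨h1, h2, h3, h4, h5⟩ := ihj (by omega)
    rw [List.range_succ, List.foldl_append, List.foldl_cons, List.foldl_nil]
    set F := (List.range j).foldl
      (fun g i => setC g (coY o ℓ i) (coX o ℓ i) (col.getD i "")) g with hFdef
    have hGW1 : GW w F := fun y hy => by rw [h2]; exact hGW y (h1 ▸ hy)
    have hkF : ℓ < nLines o F.length w := by rwa [h1]
    have hjF : j < nPos o F.length w := by rw [h1]; omega
    have hb := co_bounds o w F hGW1 ℓ j hkF hjF
    have hline : lineOf o (setC F (coY o ℓ j) (coX o ℓ j) (col.getD j "")) ℓ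
        (nPos o g.length w)
        = (lineOf o F ℓ (nPos o g.length w)).set j (col.getD j "") :=
      lineOf_setC_self o F ℓ j (nPos o g.length w) (col.getD j "") (by omega) hb.1 hb.2
    have hxj : coX o ℓ j < w := by
      cases o
      · simpa [coX, nPos] using hj1
      · simpa [coX, nLines] using hk
    refine ⟨by rw [length_setC, h1], fun y => by rw [rowLen_setC, h2 y], ?_, ?_, ?_⟩
    · intro i hi
      rw [hline]
      by_cases hij : i = j
      · subst hij
        rw [getD_set_self]
        simp only [lineOf_length]
        rw [if_pos (by omega), if_pos (by omega)]
      · rw [getD_set_ne _ _ _ _ _ hij, h3 i hi]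
        by_cases hlt : i < j
        · rw [if_pos hlt, if_pos (by omega)]
        · rw [if_neg hlt, if_neg (by omega)]
    · intro ℓ' hℓ'
      rw [lineOf_setC_ne o _ _ _ _ _ _ (Ne.symm hℓ'), h4 ℓ' hℓ']
    · intro y x hx
      rw [getC_setC_ne _ _ _ _ _ _ (Or.inr (by omega)), h5 y x hx]

theorem bpass (o : Bool) (w : Nat) (φ : List String → List String)
    (hφ : ∀ l, (φ l).length = l.length) (g : List (List String)) (hGW : GW w g) :
    ∀ k, k ≤ nLines o g.length w →
      ((List.range k).foldl
          (fun gg ℓ =>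
            (List.range (nPos o g.length w)).foldl
              (fun g' i => setC g' (coY o ℓ i) (coX o ℓ i)
                ((φ (lineOf o gg ℓ (nPos o g.length w))).getD i "")) gg) g).length = g.length ∧
      (∀ y, rowLen ((List.range k).foldl
          (fun gg ℓ =>
            (List.range (nPos o g.length w)).foldl
              (fun g' i => setC g' (coY o ℓ i) (coX o ℓ i)
                ((φ (lineOf o gg ℓ (nPos o g.length w))).getD i "")) gg) g) y = rowLen g y) ∧
      (∀ ℓ, k ≤ ℓ →
        lineOf o ((List.range k).foldl
          (fun gg ℓ =>
            (List.range (nPos o g.length w)).foldl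
              (fun g' i => setC g' (coY o ℓ i) (coX o ℓ i)
                ((φ (lineOf o gg ℓ (nPos o g.length w))).getD i "")) gg) g) ℓ (nPos o g.length w)
          = lineOf o g ℓ (nPos o g.length w)) ∧
      (∀ ℓ, ℓ < k →
        lineOf o ((List.range k).foldl
          (fun gg ℓ =>
            (List.range (nPos o g.length w)).foldl
              (fun g' i => setC g' (coY o ℓ i) (coX o ℓ i)
                ((φ (lineOf o gg ℓ (nPos o g.length w))).getD i "")) gg) g) ℓ (nPos o g.length w)
          = φ (lineOf o g ℓ (nPos o g.length w))) ∧
      (∀ y x, w ≤ x → getC ((List.range k).foldl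
          (fun gg ℓ =>
            (List.range (nPos o g.length w)).foldl
              (fun g' i => setC g' (coY o ℓ i) (coX o ℓ i)
                ((φ (lineOf o gg ℓ (nPos o g.length w))).getD i "")) gg) g) y x = getC g y x) := by
  intro k
  induction k with
  | zero =>
    intro _
    exact ⟨rfl, fun y => rfl, fun ℓ _ => rfl, fun ℓ h => absurd h (by omega), fun y x hx => rfl⟩
  | succ k ihk =>
    intro hk1
    obtain ⟨h1, h2, h3, h4, h5⟩ := ihk (by omega)
    rw [List.range_succ]
    simp only [List.foldl_append, List.foldl_cons, List.foldl_nil]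
    set F := (List.range k).foldl
      (fun gg ℓ =>
        (List.range (nPos o g.length w)).foldl
          (fun g' i => setC g' (coY o ℓ i) (coX o ℓ i)
            ((φ (lineOf o gg ℓ (nPos o g.length w))).getD i "")) gg) g with hFdef
    have hGW1 : GW w F := fun y hy => by rw [h2]; exact hGW y (h1 ▸ hy)
    have hkF : k < nLines o F.length w := by rw [h1]; omega
    have hNF : nPos o F.length w = nPos o g.length w := by rw [h1]
    have hw := bwrite o w F k (φ (lineOf o F k (nPos o g.length w))) hGW1 hkF
      (nPos o g.length w) (by rw [hNF])
    rw [hNF] at hw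
    rw [h3 k le_rfl] at hw
    rw [h3 k le_rfl]
    obtain ⟨b1, b2, b3, b4, b5⟩ := hw
    have hcollen : (φ (lineOf o g k (nPos o g.length w))).length = nPos o g.length w := by
      rw [hφ, lineOf_length]
    refine ⟨by rw [b1, h1], fun y => by rw [b2 y, h2 y], ?_, ?_, ?_⟩
    · intro ℓ hℓ
      rw [b4 ℓ (by omega), h3 ℓ (by omega)]
    · intro ℓ hℓ
      by_cases hℓk : ℓ = k
      · subst hℓk
        apply List.ext_getElem
        · simp [lineOf_length, hcollen]
        intro i hi1 hi2
        have hiN : i < nPos o g.length w := by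
          simpa [lineOf_length] using hi1
        rw [← List.getD_eq_getElem _ "" hi1, ← List.getD_eq_getElem _ "" hi2]
        rw [b3 i hiN, if_pos hiN]
      · rw [b4 ℓ hℓk, h4 ℓ (by omega)]
    · intro y x hx
      rw [b5 y x hx, h5 y x hx]

theorem grid_eq (g1 g2 : List (List String)) (h1 : g1.length = g2.length)
    (h2 : ∀ y, rowLen g1 y = rowLen g2 y) (h3 : ∀ y x, getC g1 y x = getC g2 y x) :
    g1 = g2 := by
  apply List.ext_getElem h1
  intro y hy1 hy2
  have e1 : g1.getD y [] = g1[y] := List.getD_eq_getElem g1 [] hy1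
  have e2 : g2.getD y [] = g2[y] := List.getD_eq_getElem g2 [] hy2
  apply List.ext_getElem
  · have := h2 y
    unfold rowLen at this
    rw [e1, e2] at this
    exact this
  · intro x hx1 hx2
    have := h3 y x
    unfold getC at this
    rw [e1, e2] at this
    rw [← List.getD_eq_getElem _ "" hx1, ← List.getD_eq_getElem _ "" hx2]
    exact this

theorem getD_replicate_lt {α : Type} (n i : Nat) (a d : α) (h : i < n) :
    (List.replicate n a).getD i d = a := by
  rw [List.getD_eq_getElem _ _ (by simpa using h)]
  simp

theorem pass_entries (o : Bool) (w : Nat) (g gA gB : List (List String))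
    (hAlen : gA.length = g.length) (hBlen : gB.length = g.length)
    (hArow : ∀ y, rowLen gA y = rowLen g y) (hBrow : ∀ y, rowLen gB y = rowLen g y)
    (hline : ∀ ℓ, ℓ < nLines o g.length w →
      lineOf o gA ℓ (nPos o g.length w) = lineOf o gB ℓ (nPos o g.length w))
    (hAframe : ∀ y x, w ≤ x → getC gA y x = getC g y x)
    (hBframe : ∀ y x, w ≤ x → getC gB y x = getC g y x) : gA = gB := by
  apply grid_eq _ _ (hAlen.trans hBlen.symm) (fun y => (hArow y).trans (hBrow y).symm)
  intro y x
  rcases Nat.lt_or_ge x w with hx | hx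
  · rcases Nat.lt_or_ge y g.length with hy | hy
    · cases o
      · have h := hline y (by simpa [nLines] using hy)
        have e1 := lineOf_getD false gA y (nPos false g.length w) x (by simpa [nPos] using hx)
        have e2 := lineOf_getD false gB y (nPos false g.length w) x (by simpa [nPos] using hx)
        exact e1.symm.trans ((congrArg (fun l => l.getD x "") h).trans e2)
      · have h := hline x (by simpa [nLines] using hx)
        have e1 := lineOf_getD true gA x (nPos true g.length w) y (by simpa [nPos] using hy)
        have e2 := lineOf_getD true gB x (nPos true g.length w) y (by simpa [nPos] using hy)
        exact e1.symm.trans ((congrArg (fun l => l.getD y "") h).trans e2)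
    · rw [getC_oob _ _ _ (by omega), getC_oob _ _ _ (by omega)]
  · rw [hAframe y x hx, hBframe y x hx]

theorem nLines_true (h w : Nat) : nLines true h w = w := rfl
theorem nLines_false (h w : Nat) : nLines false h w = h := rfl
theorem nPos_true (h w : Nat) : nPos true h w = h := rfl
theorem nPos_false (h w : Nat) : nPos false h w = w := rfl

theorem phiS_length (l : List String) : ((pvTiltLeft l.reverse).reverse).length = l.length := by
  simp [pvTiltLeft_length]

-- North pass: A's cursor pass over columns equals B's repack-and-write pass
theorem passN (w h : Nat) (g : List (List String)) (hGW : GW w g) (hh : g.length = h) :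
    ((List.range h).foldl
        (fun st t => (List.range w).foldl (astep true (· + 1) (· + 1) t) st)
        (g, List.replicate w 0)).1
      = (List.range w).foldl (fun gg x =>
          (List.range h).foldl (fun g' y => setC g' y x
            ((pvTiltLeft ((List.range h).map (fun y => getC gg y x))).getD y "")) gg) g ∧
    ((List.range h).foldl
        (fun st t => (List.range w).foldl (astep true (· + 1) (· + 1) t) st)
        (g, List.replicate w 0)).1.length = g.length ∧
    (∀ y, rowLen ((List.range h).foldl
        (fun st t => (List.range w).foldl (astep true (· + 1) (· + 1) t) st)
        (g, List.replicate w 0)).1 y = rowLen g y) := by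
  subst hh
  have hA := outerF true w g.length g hGW le_rfl
  simp only [nLines_true, nPos_true] at hA
  obtain ⟨a1, a2, a3, a4, a5⟩ := hA
  have hB := bpass true w pvTiltLeft pvTiltLeft_length g hGW w le_rfl
  simp only [nLines_true, nPos_true] at hB
  have hBt : (List.range w).foldl
      (fun gg ℓ => (List.range g.length).foldl
        (fun g' i => setC g' (coY true ℓ i) (coX true ℓ i)
          ((pvTiltLeft (lineOf true gg ℓ g.length)).getD i "")) gg) g
      = (List.range w).foldl (fun gg x =>
          (List.range g.length).foldl (fun g' y => setC g' y x
            ((pvTiltLeft ((List.range g.length).map (fun y => getC gg y x))).getD y "")) gg) g :=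
    rfl
  rw [hBt] at hB
  obtain ⟨b1, b2, b3, b4, b5⟩ := hB
  refine ⟨?_, a1, a2⟩
  apply pass_entries true w g _ _ a1 b1 a2 b2 ?_ a5 b5
  intro ℓ hℓ
  rw [nLines_true] at hℓ
  rw [nPos_true]
  rw [(a4 ℓ hℓ).1, b4 ℓ hℓ]
  have hr := runF_eq (lineOf true g ℓ g.length)
  rw [lineOf_length] at hr
  exact hr

-- West pass
theorem passW (w h : Nat) (g : List (List String)) (hGW : GW w g) (hh : g.length = h) :
    ((List.range w).foldl
        (fun st t => (List.range h).foldl (astep false (· + 1) (· + 1) t) st)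
        (g, List.replicate h 0)).1
      = (List.range h).foldl (fun gg y =>
          (List.range w).foldl (fun g' x => setC g' y x
            ((pvTiltLeft ((List.range w).map (fun x => getC gg y x))).getD x "")) gg) g ∧
    ((List.range w).foldl
        (fun st t => (List.range h).foldl (astep false (· + 1) (· + 1) t) st)
        (g, List.replicate h 0)).1.length = g.length ∧
    (∀ y, rowLen ((List.range w).foldl
        (fun st t => (List.range h).foldl (astep false (· + 1) (· + 1) t) st)
        (g, List.replicate h 0)).1 y = rowLen g y) := by
  subst hh
  have hA := outerF false w w g hGW le_rfl
  simp only [nLines_false, nPos_false] at hA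
  obtain ⟨a1, a2, a3, a4, a5⟩ := hA
  have hB := bpass false w pvTiltLeft pvTiltLeft_length g hGW g.length le_rfl
  simp only [nLines_false, nPos_false] at hB
  have hBt : (List.range g.length).foldl
      (fun gg ℓ => (List.range w).foldl
        (fun g' i => setC g' (coY false ℓ i) (coX false ℓ i)
          ((pvTiltLeft (lineOf false gg ℓ w)).getD i "")) gg) g
      = (List.range g.length).foldl (fun gg y =>
          (List.range w).foldl (fun g' x => setC g' y x
            ((pvTiltLeft ((List.range w).map (fun x => getC gg y x))).getD x "")) gg) g :=
    rfl
  rw [hBt] at hB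
  obtain ⟨b1, b2, b3, b4, b5⟩ := hB
  refine ⟨?_, a1, a2⟩
  apply pass_entries false w g _ _ a1 b1 a2 b2 ?_ a5 b5
  intro ℓ hℓ
  rw [nLines_false] at hℓ
  rw [nPos_false]
  rw [(a4 ℓ hℓ).1, b4 ℓ hℓ]
  have hr := runF_eq (lineOf false g ℓ w)
  rw [lineOf_length] at hr
  exact hr

-- South pass
theorem passS (w h : Nat) (g : List (List String)) (hGW : GW w g) (hh : g.length = h) :
    (((List.range h).reverse).foldl
        (fun st t => (List.range w).foldl (astep true (· - 1) (· - 1) t) st)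
        (g, List.replicate w (h - 1))).1
      = (List.range w).foldl (fun gg x =>
          (List.range h).foldl (fun g' y => setC g' y x
            (((pvTiltLeft (((List.range h).map (fun y => getC gg y x)).reverse)).reverse).getD
              y "")) gg) g ∧
    (((List.range h).reverse).foldl
        (fun st t => (List.range w).foldl (astep true (· - 1) (· - 1) t) st)
        (g, List.replicate w (h - 1))).1.length = g.length ∧
    (∀ y, rowLen (((List.range h).reverse).foldl
        (fun st t => (List.range w).foldl (astep true (· - 1) (· - 1) t) st)
        (g, List.replicate w (h - 1))).1 y = rowLen g y) := by
  subst hh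
  have hA := outerB true w g.length g (List.replicate w (g.length - 1)) hGW
    (by simp [nLines_true]) le_rfl
    (fun ℓ hℓ => by
      rw [nLines_true] at hℓ
      rw [nPos_true, getD_replicate_lt _ _ _ _ hℓ])
  simp only [nLines_true, nPos_true] at hA
  obtain ⟨a1, a2, a3, a4⟩ := hA
  have hB := bpass true w (fun l => (pvTiltLeft l.reverse).reverse) phiS_length g hGW w le_rfl
  simp only [nLines_true, nPos_true] at hB
  have hBt : (List.range w).foldl
      (fun gg ℓ => (List.range g.length).foldl
        (fun g' i => setC g' (coY true ℓ i) (coX true ℓ i)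
          (((fun l => (pvTiltLeft l.reverse).reverse) (lineOf true gg ℓ g.length)).getD i ""))
        gg) g
      = (List.range w).foldl (fun gg x =>
          (List.range g.length).foldl (fun g' y => setC g' y x
            (((pvTiltLeft (((List.range g.length).map (fun y => getC gg y x)).reverse)).reverse).getD
              y "")) gg) g := rfl
  rw [hBt] at hB
  obtain ⟨b1, b2, b3, b4, b5⟩ := hB
  refine ⟨?_, a1, a2⟩
  apply pass_entries true w g _ _ a1 b1 a2 b2 ?_ a4 b5
  intro ℓ hℓ
  rw [nLines_true] at hℓ
  rw [nPos_true]
  rw [a3 ℓ hℓ, b4 ℓ hℓ]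
  rw [getD_replicate_lt _ _ _ _ hℓ]
  have hr := runB_eq (lineOf true g ℓ g.length)
  rw [lineOf_length] at hr
  exact hr

-- East pass
theorem passE (w h : Nat) (g : List (List String)) (hGW : GW w g) (hh : g.length = h) :
    (((List.range w).reverse).foldl
        (fun st t => (List.range h).foldl (astep false (· - 1) (· - 1) t) st)
        (g, List.replicate h (w - 1))).1
      = (List.range h).foldl (fun gg y =>
          (List.range w).foldl (fun g' x => setC g' y x
            (((pvTiltLeft (((List.range w).map (fun x => getC gg y x)).reverse)).reverse).getD
              x "")) gg) g ∧
    (((List.range w).reverse).foldl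
        (fun st t => (List.range h).foldl (astep false (· - 1) (· - 1) t) st)
        (g, List.replicate h (w - 1))).1.length = g.length ∧
    (∀ y, rowLen (((List.range w).reverse).foldl
        (fun st t => (List.range h).foldl (astep false (· - 1) (· - 1) t) st)
        (g, List.replicate h (w - 1))).1 y = rowLen g y) := by
  subst hh
  have hA := outerB false w w g (List.replicate g.length (w - 1)) hGW
    (by simp [nLines_false]) le_rfl
    (fun ℓ hℓ => by
      rw [nLines_false] at hℓ
      rw [nPos_false, getD_replicate_lt _ _ _ _ hℓ])
  simp only [nLines_false, nPos_false] at hA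
  obtain ⟨a1, a2, a3, a4⟩ := hA
  have hB := bpass false w (fun l => (pvTiltLeft l.reverse).reverse) phiS_length g hGW g.length le_rfl
  simp only [nLines_false, nPos_false] at hB
  have hBt : (List.range g.length).foldl
      (fun gg ℓ => (List.range w).foldl
        (fun g' i => setC g' (coY false ℓ i) (coX false ℓ i)
          (((fun l => (pvTiltLeft l.reverse).reverse) (lineOf false gg ℓ w)).getD i ""))
        gg) g
      = (List.range g.length).foldl (fun gg y =>
          (List.range w).foldl (fun g' x => setC g' y x
            (((pvTiltLeft (((List.range w).map (fun x => getC gg y x)).reverse)).reverse).getD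
              x "")) gg) g := rfl
  rw [hBt] at hB
  obtain ⟨b1, b2, b3, b4, b5⟩ := hB
  refine ⟨?_, a1, a2⟩
  apply pass_entries false w g _ _ a1 b1 a2 b2 ?_ a4 b5
  intro ℓ hℓ
  rw [nLines_false] at hℓ
  rw [nPos_false]
  rw [a3 ℓ hℓ, b4 ℓ hℓ]
  rw [getD_replicate_lt _ _ _ _ hℓ]
  have hr := runB_eq (lineOf false g ℓ w)
  rw [lineOf_length] at hr
  exact hr

theorem GW_transport (w : Nat) (g g' : List (List String)) (hlen : g'.length = g.length)
    (hrow : ∀ y, rowLen g' y = rowLen g y) (h : GW w g) : GW w g' :=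
  fun y hy => by rw [hrow y]; exact h y (hlen ▸ hy)

-- ===== VERDICT (by name: the statement is the Claim_ definition above) =====
theorem tilt_platform_spin_spec : Claim_equal_tilt_platform_spin := by
  intro platform _ hPre
  obtain ⟨hne, hrows⟩ := hPre
  show tilt_platform_spin platform = tilt_platform_spin_alt platform
  have hGW : GW (platform.headD []).length platform := by
    intro y hy
    have hm : platform.getD y [] ∈ platform := by
      rw [List.getD_eq_getElem _ _ hy]
      exact List.getElem_mem hy
    exact hrows _ hm
  unfold tilt_platform_spin tilt_platform_spin_alt
  simp only [List.map_reverse]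
  have p1 := passN (platform.headD []).length platform.length platform hGW rfl
  have e1 := p1.1
  have hlen1 := p1.2.1
  have hrow1 := p1.2.2
  rw [e1] at hlen1 hrow1
  rw [e1]
  have hGW1 := GW_transport _ _ _ hlen1 hrow1 hGW
  have p2 := passW (platform.headD []).length platform.length _ hGW1 hlen1
  have e2 := p2.1
  have hlen2 := p2.2.1
  have hrow2 := p2.2.2
  rw [e2] at hlen2 hrow2
  rw [e2]
  have hGW2 := GW_transport _ _ _ hlen2 hrow2 hGW1
  have p3 := passS (platform.headD []).length platform.length _ hGW2
    (hlen2.trans hlen1)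
  have e3 := p3.1
  have hlen3 := p3.2.1
  have hrow3 := p3.2.2
  rw [e3] at hlen3 hrow3
  rw [e3]
  have hGW3 := GW_transport _ _ _ hlen3 hrow3 hGW2
  have p4 := passE (platform.headD []).length platform.length _ hGW3
    (hlen3.trans (hlen2.trans hlen1))
  rw [p4.1]
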